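-- pv_equiv track=rewrite | github.com/pdgramajo/coge | web/bin/quota-alignment/cluster_utils.py | make_range
-- ===== SOURCE A (Python) =====
-- def make_range(clusters, extend=0):
--     """
--     Convert to interval ends from a list of anchors
--     extend modifies the xmax, ymax boundary of the box,
--     which can be positive or negative
--     very useful when we want to make the range as fuzzy as we specify
--     """
--     eclusters = []
--     for cluster in clusters:
--         xlist, ylist, scores = zip(*cluster)
--         score = sum(scores)
--
--         xchr, xmin = min(xlist)
--         xchr, xmax = max(xlist)
--         ychr, ymin = min(ylist)
--         ychr, ymax = max(ylist)
--
--         # allow fuzziness to the boundary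
--         xmax += extend
--         ymax += extend
--         # because extend can be negative values, we don't want it to be less than min
--         if xmax < xmin: xmin, xmax = xmax, xmin
--         if ymax < ymin: ymin, ymax = ymax, ymin
--         #if xmax < xmin: xmax = xmin
--         #if ymax < ymin: ymax = ymin
--
--         eclusters.append(((xchr, xmin, xmax),\
--                           (ychr, ymin, ymax), score))
--
--     return eclusters
-- ===== SOURCE B (Python) =====
-- def make_range(clusters, extend=0):
--     """One explicit pass per cluster: accumulate score and track the
--     lexicographically min/max (chr, pos) pairs directly, instead of
--     zip(*cluster) plus four separate min/max scans."""
--     eclusters = []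
--     for cluster in clusters:
--         xmn, ymn, score = cluster[0]
--         xmx, ymx = xmn, ymn
--         for x, y, s in cluster[1:]:
--             score += s
--             if x < xmn: xmn = x
--             if x > xmx: xmx = x
--             if y < ymn: ymn = y
--             if y > ymx: ymx = y
--         xchr, xmax = xmx
--         ychr, ymax = ymx
--         xmin = xmn[1]
--         ymin = ymn[1]
--         xmax += extend
--         ymax += extend
--         if xmax < xmin: xmin, xmax = xmax, xmin
--         if ymax < ymin: ymin, ymax = ymax, ymin
--         eclusters.append(((xchr, xmin, xmax), (ychr, ymin, ymax), score))
--     return eclusters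
-- ===== Notes on version B (the rewrite author's own statement) =====
-- stated objective: alternative
-- what changed: Replaces zip(*cluster) plus sum and four separate min/max scans with one explicit pass per cluster that accumulates the score and maintains the lexicographically minimal/maximal (chr,pos) pairs by direct tuple comparison.
import Mathlib
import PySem

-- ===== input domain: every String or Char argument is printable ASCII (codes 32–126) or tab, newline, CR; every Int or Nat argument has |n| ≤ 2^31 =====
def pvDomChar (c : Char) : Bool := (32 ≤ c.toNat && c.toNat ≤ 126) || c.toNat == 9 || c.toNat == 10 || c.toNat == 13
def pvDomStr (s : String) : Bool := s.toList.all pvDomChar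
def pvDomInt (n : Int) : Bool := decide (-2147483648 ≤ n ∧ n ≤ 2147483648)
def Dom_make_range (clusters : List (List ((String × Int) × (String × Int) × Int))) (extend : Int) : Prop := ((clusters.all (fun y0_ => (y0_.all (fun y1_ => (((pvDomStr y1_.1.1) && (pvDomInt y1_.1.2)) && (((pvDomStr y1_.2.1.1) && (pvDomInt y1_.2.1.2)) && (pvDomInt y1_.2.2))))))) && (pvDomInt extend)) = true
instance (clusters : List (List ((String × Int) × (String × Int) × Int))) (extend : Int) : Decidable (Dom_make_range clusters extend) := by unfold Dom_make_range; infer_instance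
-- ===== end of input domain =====

-- B makes one explicit pass per cluster (running score + running lexicographic min/max pairs)
-- instead of A's zip(*cluster) plus sum and four separate min/max scans; same cost, different decomposition.

-- ===== PORT A =====
-- Python's min/max over a list of (str,int) tuples compares lexicographically, first extremal wins:
-- PySem.List.min2?/max2? with keys Prod.fst, Prod.snd. sum(scores) is List.sum.
def make_range (clusters : List (List ((String × Int) × (String × Int) × Int))) (extend : Int) : List ((String × Int × Int) × (String × Int × Int) × Int) :=
  clusters.foldl (fun eclusters cluster =>
    let xlist := cluster.map (fun a => a.1)
    let ylist := cluster.map (fun a => a.2.1)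
    let scores := cluster.map (fun a => a.2.2)
    let score := scores.sum
    match PySem.List.min2? xlist Prod.fst Prod.snd, PySem.List.max2? xlist Prod.fst Prod.snd,
          PySem.List.min2? ylist Prod.fst Prod.snd, PySem.List.max2? ylist Prod.fst Prod.snd with
    | some xminp, some xmaxp, some yminp, some ymaxp =>
      -- xchr/ychr are overwritten by the max-assignment, exactly as in A
      let xchr := xmaxp.1
      let ychr := ymaxp.1
      let xmin := xminp.2
      let xmax := xmaxp.2 + extend
      let ymin := yminp.2
      let ymax := ymaxp.2 + extend
      let p := if xmax < xmin then (xmax, xmin) else (xmin, xmax)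
      let q := if ymax < ymin then (ymax, ymin) else (ymin, ymax)
      eclusters ++ [((xchr, p.1, p.2), (ychr, q.1, q.2), score)]
    | _, _, _, _ => eclusters  -- Python raises ValueError here (empty cluster); outside Pre_
    ) []

-- ===== PORT B =====
-- Python tuple comparison (str,int) < (str,int): lexicographic, exact for total orders.
def pyPairLt (a b : String × Int) : Bool := a.1 < b.1 || (a.1 == b.1 && a.2 < b.2)

def make_range_alt (clusters : List (List ((String × Int) × (String × Int) × Int))) (extend : Int) : List ((String × Int × Int) × (String × Int × Int) × Int) :=
  clusters.foldl (fun eclusters cluster =>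
    match cluster with
    | [] => eclusters  -- Python raises IndexError here (cluster[0]); outside Pre_
    | (x0, y0, s0) :: rest =>
      let st := rest.foldl (fun st a =>
        let score := st.2.2.2.2 + a.2.2
        let xmn := if pyPairLt a.1 st.1 then a.1 else st.1
        let xmx := if pyPairLt st.2.1 a.1 then a.1 else st.2.1
        let ymn := if pyPairLt a.2.1 st.2.2.1 then a.2.1 else st.2.2.1
        let ymx := if pyPairLt st.2.2.2.1 a.2.1 then a.2.1 else st.2.2.2.1
        (xmn, xmx, ymn, ymx, score)) (x0, x0, y0, y0, s0)
      let xchr := st.2.1.1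
      let ychr := st.2.2.2.1.1
      let xmin := st.1.2
      let ymin := st.2.2.1.2
      let xmax := st.2.1.2 + extend
      let ymax := st.2.2.2.1.2 + extend
      let p := if xmax < xmin then (xmax, xmin) else (xmin, xmax)
      let q := if ymax < ymin then (ymax, ymin) else (ymin, ymax)
      eclusters ++ [((xchr, p.1, p.2), (ychr, q.1, q.2), st.2.2.2.2)]
    ) []

-- ===== PRECONDITION & SPEC =====
-- Pre_ excludes inputs containing an empty cluster: there A's 'zip(*cluster)' raises ValueError (and B raises IndexError).
def Pre_make_range (clusters : List (List ((String × Int) × (String × Int) × Int))) (extend : Int) : Prop :=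
  ∀ c ∈ clusters, c ≠ []
instance (clusters : List (List ((String × Int) × (String × Int) × Int))) (extend : Int) : Decidable (Pre_make_range clusters extend) := by unfold Pre_make_range; infer_instance
def pvWitness_make_range : (List (List ((String × Int) × (String × Int) × Int))) × Int :=
  ([[(("a", 1), ("b", 2), 3)], [(("a", 5), ("c", -1), 2), (("a", 2), ("c", 4), 1)]], -1)
def Spec_make_range (clusters : List (List ((String × Int) × (String × Int) × Int))) (extend : Int) (out : List ((String × Int × Int) × (String × Int × Int) × Int)) : Prop := out = make_range_alt clusters extend
instance (clusters : List (List ((String × Int) × (String × Int) × Int))) (extend : Int) (out : List ((String × Int × Int) × (String × Int × Int) × Int)) : Decidable (Spec_make_range clusters extend out) := by unfold Spec_make_range; infer_instance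

-- ===== CLAIM (what is proved, stated in full; the proofs are below) =====
def Claim_equal_make_range : Prop := ∀ (clusters : List (List ((String × Int) × (String × Int) × Int))) (extend : Int), Dom_make_range clusters extend → Pre_make_range clusters extend → Spec_make_range clusters extend (make_range clusters extend)

-- ===== LEMMAS AND PROOFS =====

-- min2?/max2?'s comparison equals Python tuple '<' (strings are linearly ordered)
theorem pyPairLt_eq (p m : String × Int) :
    (decide (p.1 < m.1) || (!decide (m.1 < p.1) && decide (p.2 < m.2))) = pyPairLt p m := by
  unfold pyPairLt
  rcases lt_trichotomy p.1 m.1 with h | h | h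
  · simp [h]
  · simp [h]
  · simp [not_lt_of_gt h, ne_of_gt h, h]

theorem min2?_fold (f : ((String × Int) × (String × Int) × Int) → String × Int)
    (t : List ((String × Int) × (String × Int) × Int)) (m : String × Int) :
    PySem.List.min2? (m :: t.map f) Prod.fst Prod.snd
      = some (t.foldl (fun m a => if pyPairLt (f a) m then f a else m) m) := by
  unfold PySem.List.min2?
  simp only [List.foldl_cons]
  induction t generalizing m with
  | nil => rfl
  | cons a t ih =>
      simp only [List.map_cons, List.foldl_cons]
      rw [pyPairLt_eq (f a) m]
      by_cases h : pyPairLt (f a) m = true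
      · rw [if_pos h, if_pos h]; exact ih _
      · rw [if_neg h, if_neg h]; exact ih _

theorem max2?_fold (f : ((String × Int) × (String × Int) × Int) → String × Int)
    (t : List ((String × Int) × (String × Int) × Int)) (m : String × Int) :
    PySem.List.max2? (m :: t.map f) Prod.fst Prod.snd
      = some (t.foldl (fun m a => if pyPairLt m (f a) then f a else m) m) := by
  unfold PySem.List.max2?
  simp only [List.foldl_cons]
  induction t generalizing m with
  | nil => rfl
  | cons a t ih =>
      simp only [List.map_cons, List.foldl_cons]
      rw [pyPairLt_eq m (f a)]
      by_cases h : pyPairLt m (f a) = true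
      · rw [if_pos h, if_pos h]; exact ih _
      · rw [if_neg h, if_neg h]; exact ih _

-- B's single five-accumulator loop is the product of the four min/max loops and the score sum
theorem inner_fold_eq (rest : List ((String × Int) × (String × Int) × Int))
    (xmn xmx ymn ymx : String × Int) (sc : Int) :
    rest.foldl (fun st a =>
        let score := st.2.2.2.2 + a.2.2
        let xmn := if pyPairLt a.1 st.1 then a.1 else st.1
        let xmx := if pyPairLt st.2.1 a.1 then a.1 else st.2.1
        let ymn := if pyPairLt a.2.1 st.2.2.1 then a.2.1 else st.2.2.1
        let ymx := if pyPairLt st.2.2.2.1 a.2.1 then a.2.1 else st.2.2.2.1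
        (xmn, xmx, ymn, ymx, score)) (xmn, xmx, ymn, ymx, sc)
      = (rest.foldl (fun m a => if pyPairLt a.1 m then a.1 else m) xmn,
         rest.foldl (fun m a => if pyPairLt m a.1 then a.1 else m) xmx,
         rest.foldl (fun m a => if pyPairLt a.2.1 m then a.2.1 else m) ymn,
         rest.foldl (fun m a => if pyPairLt m a.2.1 then a.2.1 else m) ymx,
         sc + (rest.map (fun a => a.2.2)).sum) := by
  induction rest generalizing xmn xmx ymn ymx sc with
  | nil => simp
  | cons a t ih =>
      simp only [List.foldl_cons, List.map_cons, List.sum_cons]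
      rw [ih]
      ring_nf

-- ===== VERDICT (by name: the statement is the Claim_ definition above) =====
theorem make_range_spec : Claim_equal_make_range := by
  intro clusters extend _ hpre
  unfold Spec_make_range make_range make_range_alt
  apply PySem.List.foldl_congr_mem
  intro acc cluster hmem
  match cluster, hpre cluster hmem with
  | (x0, y0, s0) :: rest, _ =>
    simp only [List.map_cons]
    rw [min2?_fold (fun a => a.1) rest x0, max2?_fold (fun a => a.1) rest x0,
        min2?_fold (fun a => a.2.1) rest y0, max2?_fold (fun a => a.2.1) rest y0,
        inner_fold_eq]
    simp
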